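-- pv_equiv track=rewrite | github.com/cmu-db/cmdbac | cmudbac/core/drivers/count/count.py | count_query
-- ===== SOURCE A (Python) =====
-- keywords = ['SELECT', 'INSERT', 'UPDATE', 'DELETE']
--
-- def count_query(queries):
-- 	ret = {}
-- 	for keyword in keywords:
-- 		ret[keyword] = 0
-- 	ret['OTHER'] = 0
-- 	for query in queries:
-- 		counted = False
-- 		for keyword in keywords:
-- 			if keyword in query['raw'].upper():
-- 				ret[keyword] += 1
-- 				counted = True
-- 		if not counted:
-- 			ret['OTHER'] += 1
-- 	return ret
-- ===== SOURCE B (Python) =====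
-- keywords = ['SELECT', 'INSERT', 'UPDATE', 'DELETE']
--
-- def count_query(queries):
--     # keyword-outer decomposition: one independent scan per keyword, then one scan for OTHER
--     uppers = [query['raw'].upper() for query in queries]
--     ret = {kw: sum(1 for u in uppers if kw in u) for kw in keywords}
--     ret['OTHER'] = sum(1 for u in uppers if not any(kw in u for kw in keywords))
--     return ret
-- ===== Notes on version B (the rewrite author's own statement) =====
-- stated objective: alternative
-- what changed: A makes one pass over the queries with an inner keyword loop and a 'counted' flag mutating one dict; B first extracts the uppercased raw strings, then performs one independent counting scan per keyword plus a final scan for OTHER (keyword-outer instead of query-outer), with no mutable flag.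
import Mathlib
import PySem

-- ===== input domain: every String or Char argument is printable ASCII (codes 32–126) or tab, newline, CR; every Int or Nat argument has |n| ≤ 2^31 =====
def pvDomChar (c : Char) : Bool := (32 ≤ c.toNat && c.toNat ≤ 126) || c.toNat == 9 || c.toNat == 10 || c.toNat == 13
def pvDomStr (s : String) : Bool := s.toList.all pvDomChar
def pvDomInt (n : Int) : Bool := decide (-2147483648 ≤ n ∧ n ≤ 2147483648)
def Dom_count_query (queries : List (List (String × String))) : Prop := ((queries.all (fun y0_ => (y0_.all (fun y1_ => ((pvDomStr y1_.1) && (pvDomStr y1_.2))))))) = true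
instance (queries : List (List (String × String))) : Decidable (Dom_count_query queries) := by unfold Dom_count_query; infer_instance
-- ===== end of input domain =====

-- B reorganises A's single query-outer pass (inner keyword loop + 'counted' flag mutating one
-- dict) into independent keyword-outer counting scans plus a final OTHER scan; same cost.
-- A mutates nothing observable; only the return value is claimed.

-- the module-level constant `keywords` shared by both Pythons
def pvKeywords : List String := ["SELECT", "INSERT", "UPDATE", "DELETE"]

-- ===== PORT A =====
-- body of A's `for query in queries` loop, given u = query['raw'].upper():
-- inner loop over keywords threading (ret, counted), then the OTHER increment
def pvStepBody (d : PySem.Dict String Int) (u : String) : PySem.Dict String Int :=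
  let st := pvKeywords.foldl
    (fun (st : PySem.Dict String Int × Bool) kw =>
      if PySem.Str.isIn kw u then (st.1.insert kw (st.1.getD kw 0 + 1), true) else st)
    (d, false)
  if st.2 then st.1 else st.1.insert "OTHER" (st.1.getD "OTHER" 0 + 1)

def pvStepA (d : PySem.Dict String Int) (q : List (String × String)) : PySem.Dict String Int :=
  pvStepBody d (PySem.Str.upper (((PySem.Dict.mk q).get? "raw").getD ""))   -- KeyError excluded by Pre_

def count_query (queries : List (List (String × String))) : List (String × Int) :=
  let ret := pvKeywords.foldl (fun d kw => d.insert kw 0) PySem.Dict.empty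
  let ret := ret.insert "OTHER" 0
  (queries.foldl pvStepA ret).items

-- ===== PORT B =====
def count_query_alt (queries : List (List (String × String))) : List (String × Int) :=
  let uppers := queries.map
    (fun q => PySem.Str.upper (((PySem.Dict.mk q).get? "raw").getD ""))   -- KeyError excluded by Pre_
  pvKeywords.map (fun kw => (kw, ((uppers.countP (fun u => PySem.Str.isIn kw u) : Nat) : Int)))
    ++ [("OTHER",
        ((uppers.countP (fun u => !pvKeywords.any (fun kw => PySem.Str.isIn kw u)) : Nat) : Int))]

-- ===== PRECONDITION & SPEC =====
-- Pre_ excludes exactly the queries missing a "raw" key, on which both Pythons raise KeyError.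
def Pre_count_query (queries : List (List (String × String))) : Prop :=
  (queries.all (fun q => q.any (fun p => p.1 == "raw"))) = true
instance (queries : List (List (String × String))) : Decidable (Pre_count_query queries) := by unfold Pre_count_query; infer_instance
def pvWitness_count_query : (List (List (String × String))) := [[("raw", "select 1")], [("raw", "commit")]]

def Spec_count_query (queries : List (List (String × String))) (out : List (String × Int)) : Prop := out = count_query_alt queries
instance (queries : List (List (String × String))) (out : List (String × Int)) : Decidable (Spec_count_query queries out) := by unfold Spec_count_query; infer_instance

-- ===== CLAIM (what is proved, stated in full; the proofs are below) =====
def Claim_equal_count_query : Prop := ∀ (queries : List (List (String × String))), Dom_count_query queries → Pre_count_query queries → Spec_count_query queries (count_query queries)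

-- ===== LEMMAS AND PROOFS =====

-- the uppercased raw string of one query
def pvUp (q : List (String × String)) : String :=
  PySem.Str.upper (((PySem.Dict.mk q).get? "raw").getD "")

-- one step of A's loop on a dict of the fixed 5-key shape
set_option maxHeartbeats 2000000 in
lemma pvStepBody_eq (a b c d e : Int) (u : String) :
    pvStepBody (PySem.Dict.mk [("SELECT", a), ("INSERT", b), ("UPDATE", c), ("DELETE", d), ("OTHER", e)]) u
    = PySem.Dict.mk
        [("SELECT", a + if PySem.Str.isIn "SELECT" u then 1 else 0),
         ("INSERT", b + if PySem.Str.isIn "INSERT" u then 1 else 0),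
         ("UPDATE", c + if PySem.Str.isIn "UPDATE" u then 1 else 0),
         ("DELETE", d + if PySem.Str.isIn "DELETE" u then 1 else 0),
         ("OTHER", e + if !pvKeywords.any (fun kw => PySem.Str.isIn kw u) then 1 else 0)] := by
  by_cases hS : PySem.Chars.isIn ['S','E','L','E','C','T'] u.toList = true <;>
  by_cases hI : PySem.Chars.isIn ['I','N','S','E','R','T'] u.toList = true <;>
  by_cases hU : PySem.Chars.isIn ['U','P','D','A','T','E'] u.toList = true <;>
  by_cases hD : PySem.Chars.isIn ['D','E','L','E','T','E'] u.toList = true <;>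
    simp [pvStepBody, pvKeywords, hS, hI, hU, hD,
      PySem.Dict.insert, PySem.Dict.getD, PySem.Dict.get?, PySem.Dict.contains]

lemma pvStepA_eq (a b c d e : Int) (q : List (String × String)) :
    pvStepA (PySem.Dict.mk [("SELECT", a), ("INSERT", b), ("UPDATE", c), ("DELETE", d), ("OTHER", e)]) q
    = PySem.Dict.mk
        [("SELECT", a + if PySem.Str.isIn "SELECT" (pvUp q) then 1 else 0),
         ("INSERT", b + if PySem.Str.isIn "INSERT" (pvUp q) then 1 else 0),
         ("UPDATE", c + if PySem.Str.isIn "UPDATE" (pvUp q) then 1 else 0),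
         ("DELETE", d + if PySem.Str.isIn "DELETE" (pvUp q) then 1 else 0),
         ("OTHER", e + if !pvKeywords.any (fun kw => PySem.Str.isIn kw (pvUp q)) then 1 else 0)] :=
  pvStepBody_eq a b c d e (pvUp q)

-- A's query loop computed in closed form on the 5-key dict
lemma pvLoopA (qs : List (List (String × String))) (a b c d e : Int) :
    qs.foldl pvStepA (PySem.Dict.mk [("SELECT", a), ("INSERT", b), ("UPDATE", c), ("DELETE", d), ("OTHER", e)])
    = PySem.Dict.mk
        [("SELECT", a + ((qs.map pvUp).countP (fun u => PySem.Str.isIn "SELECT" u) : Nat)),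
         ("INSERT", b + ((qs.map pvUp).countP (fun u => PySem.Str.isIn "INSERT" u) : Nat)),
         ("UPDATE", c + ((qs.map pvUp).countP (fun u => PySem.Str.isIn "UPDATE" u) : Nat)),
         ("DELETE", d + ((qs.map pvUp).countP (fun u => PySem.Str.isIn "DELETE" u) : Nat)),
         ("OTHER", e + ((qs.map pvUp).countP (fun u => !pvKeywords.any (fun kw => PySem.Str.isIn kw u)) : Nat))] := by
  induction qs generalizing a b c d e with
  | nil => simp
  | cons q qs ih =>
    rw [List.foldl_cons, pvStepA_eq, ih]
    simp only [List.map_cons, List.countP_cons, PySem.Dict.mk.injEq, List.cons.injEq,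
      Prod.mk.injEq, and_true, true_and]
    refine ⟨?_, ?_, ?_, ?_, ?_⟩ <;> (split_ifs <;> push_cast <;> ring)

-- ===== VERDICT (by name: the statement is the Claim_ definition above) =====
theorem count_query_spec : Claim_equal_count_query := by
  intro queries _ _
  show count_query queries = count_query_alt queries
  have h : count_query queries
      = (queries.foldl pvStepA (PySem.Dict.mk
          [("SELECT", 0), ("INSERT", 0), ("UPDATE", 0), ("DELETE", 0), ("OTHER", 0)])).items := rfl
  rw [h, pvLoopA]
  simp only [count_query_alt, pvKeywords, List.map_cons, List.map_nil,
    List.countP_map, List.any_cons, List.any_nil, Bool.or_false]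
  simp [Function.comp_def, pvUp]
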